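-- pv_equiv track=rewrite | github.com/mmtk/mmtk-core | tools/verify_oom_stack.py | split_top_level_once
-- ===== SOURCE A (Python) =====
-- def split_top_level_once(text: str, separator: str) -> tuple[str, str | None]:
--     depth = 0
--     i = 0
--     while i < len(text):
--         ch = text[i]
--         if ch in "<({[":
--             depth += 1
--         elif ch in ">)}]":
--             depth = max(depth - 1, 0)
--         elif depth == 0 and text.startswith(separator, i):
--             return text[:i], text[i + len(separator) :]
--         i += 1
--     return text, None
-- ===== SOURCE B (Python) =====
-- def split_top_level_once(text: str, separator: str) -> tuple[str, str | None]:
--     # pass 1: bracket depth just before each character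
--     depths = []
--     depth = 0
--     for ch in text:
--         depths.append(depth)
--         if ch in "<({[":
--             depth += 1
--         elif ch in ">)}]":
--             depth = max(depth - 1, 0)
--     # pass 2: first top-level, non-bracket position where the separator starts
--     for i, ch in enumerate(text):
--         if depths[i] == 0 and ch not in "<({[>)}]" and text.startswith(separator, i):
--             return text[:i], text[i + len(separator):]
--     return text, None
-- ===== Notes on version B (the rewrite author's own statement) =====
-- stated objective: alternative
-- what changed: Replaces A's single stateful while-loop (depth tracking interleaved with the separator search) by two separate passes: one pass precomputes the bracket depth before each character into a list, a second pass scans for the first index whose precomputed depth is 0, whose character is not a bracket, and where the separator starts.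
import Mathlib
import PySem

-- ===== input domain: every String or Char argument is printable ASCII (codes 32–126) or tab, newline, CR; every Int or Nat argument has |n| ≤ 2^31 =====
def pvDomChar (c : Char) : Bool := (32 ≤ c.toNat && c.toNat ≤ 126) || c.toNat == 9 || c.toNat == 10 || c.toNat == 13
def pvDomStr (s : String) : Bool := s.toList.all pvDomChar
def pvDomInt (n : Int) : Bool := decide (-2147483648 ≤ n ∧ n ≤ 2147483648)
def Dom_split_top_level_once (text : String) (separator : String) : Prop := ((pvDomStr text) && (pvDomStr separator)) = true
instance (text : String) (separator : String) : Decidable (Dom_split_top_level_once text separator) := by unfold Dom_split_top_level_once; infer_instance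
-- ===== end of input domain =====

-- B is an alternative decomposition: a first pass precomputes bracket depths, a second pass searches.

-- ===== PORT A =====
-- A's while-loop: one pass keeping depth and index i; rest = text.drop i.
def splitA_go (text sep : List Char) (depth : Int) (i : Nat) : List Char → String × Option String
  | [] => (String.ofList text, none)
  | ch :: rest =>
    if List.elem ch ['<', '(', '{', '['] then
      splitA_go text sep (depth + 1) (i + 1) rest
    else if List.elem ch ['>', ')', '}', ']'] then
      splitA_go text sep (max (depth - 1) 0) (i + 1) rest
    else if depth == 0 && PySem.Chars.startswith (text.drop i) sep then
      (String.ofList (text.take i), some (String.ofList (text.drop (i + sep.length))))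
    else
      splitA_go text sep depth (i + 1) rest

def split_top_level_once (text : String) (separator : String) : String × Option String :=
  splitA_go text.toList separator.toList 0 0 text.toList

-- ===== PORT B =====
-- pass 1 of Source B: depths.append(depth) then update depth per character.
def splitB_depths (acc : List Int) (depth : Int) : List Char → List Int
  | [] => acc
  | ch :: rest =>
    splitB_depths (acc ++ [depth])
      (if List.elem ch ['<', '(', '{', '['] then depth + 1
       else if List.elem ch ['>', ')', '}', ']'] then max (depth - 1) 0
       else depth) rest

-- pass 2 of Source B: 'for i, ch in enumerate(text)' with the precomputed depths.
def splitB_search (text sep : List Char) (depths : List Int) (i : Nat) : List Char → String × Option String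
  | [] => (String.ofList text, none)
  | ch :: rest =>
    if depths.getD i 0 == 0 && !(List.elem ch ['<', '(', '{', '[', '>', ')', '}', ']'])
        && PySem.Chars.startswith (text.drop i) sep then
      (String.ofList (text.take i), some (String.ofList (text.drop (i + sep.length))))
    else
      splitB_search text sep depths (i + 1) rest

def split_top_level_once_alt (text : String) (separator : String) : String × Option String :=
  splitB_search text.toList separator.toList (splitB_depths [] 0 text.toList) 0 text.toList

-- ===== PRECONDITION & SPEC =====
def Spec_split_top_level_once (text : String) (separator : String) (out : String × Option String) : Prop := out = split_top_level_once_alt text separator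
instance (text : String) (separator : String) (out : String × Option String) : Decidable (Spec_split_top_level_once text separator out) := by unfold Spec_split_top_level_once; infer_instance

-- ===== CLAIM (what is proved, stated in full; the proofs are below) =====
def Claim_equal_split_top_level_once : Prop := ∀ (text : String) (separator : String), Dom_split_top_level_once text separator → Spec_split_top_level_once text separator (split_top_level_once text separator)

-- ===== LEMMAS AND PROOFS =====

-- the per-character depth update shared by both programs
def depthStep (d : Int) (ch : Char) : Int :=
  if List.elem ch ['<', '(', '{', '['] then d + 1
  else if List.elem ch ['>', ')', '}', ']'] then max (d - 1) 0
  else d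

-- the depths list written functionally
def depthsList (d : Int) : List Char → List Int
  | [] => []
  | ch :: rest => d :: depthsList (depthStep d ch) rest

theorem splitB_depths_eq (cs : List Char) : ∀ (acc : List Int) (d : Int),
    splitB_depths acc d cs = acc ++ depthsList d cs := by
  induction cs with
  | nil => intro acc d; simp [splitB_depths, depthsList]
  | cons ch rest ih =>
    intro acc d
    simp [splitB_depths, depthsList, ih, depthStep]

theorem splitA_eq_splitB (text sep : List Char) (depths : List Int) :
    ∀ (rest : List Char) (i : Nat) (d : Int),
      depths.drop i = depthsList d rest →
      splitA_go text sep d i rest = splitB_search text sep depths i rest := by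
  intro rest
  induction rest with
  | nil => intro i d _; simp [splitA_go, splitB_search]
  | cons ch rest' ih =>
    intro i d h
    have h0 : depths[i]? = some d := by
      have h1 : (List.drop i depths)[0]? = depths[i + 0]? := List.getElem?_drop
      rw [h] at h1
      simpa using h1.symm
    have hget : depths.getD i 0 = d := by
      simp [List.getD_eq_getElem?_getD, h0]
    have hdrop : depths.drop (i + 1) = depthsList (depthStep d ch) rest' := by
      have h2 : (depths.drop i).drop 1 = depthsList (depthStep d ch) rest' := by
        rw [h]; simp [depthsList]
      simpa [List.drop_drop, Nat.add_comm] using h2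
    cases hop : List.elem ch ['<', '(', '{', '['] with
    | true =>
      have hbr : List.elem ch ['<', '(', '{', '[', '>', ')', '}', ']'] = true := by
        simp only [List.elem_eq_mem, decide_eq_true_eq, List.mem_cons] at hop ⊢
        tauto
      have hstep : depthStep d ch = d + 1 := by
        simp only [depthStep, hop, reduceIte]
      simp only [splitA_go, splitB_search, hop, hbr, Bool.not_true, Bool.and_false,
        Bool.false_and, Bool.false_eq_true, reduceIte]
      first
      | exact ih (i + 1) (d + 1) (hstep ▸ hdrop)
      | (split_ifs <;> first | rfl | exact ih (i + 1) (d + 1) (hstep ▸ hdrop) | simp_all)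
    | false =>
      cases hcl : List.elem ch ['>', ')', '}', ']'] with
      | true =>
        have hbr : List.elem ch ['<', '(', '{', '[', '>', ')', '}', ']'] = true := by
          simp only [List.elem_eq_mem, decide_eq_true_eq, List.mem_cons] at hcl ⊢
          tauto
        have hstep : depthStep d ch = max (d - 1) 0 := by
          simp only [depthStep, hop, hcl]
          split_ifs <;> simp_all
        simp only [splitA_go, splitB_search, hop, hbr, hcl, Bool.not_true, Bool.and_false,
          Bool.false_and, Bool.false_eq_true, reduceIte]
        first
        | exact ih (i + 1) (max (d - 1) 0) (hstep ▸ hdrop)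
        | (split_ifs <;> first | rfl | exact ih (i + 1) (max (d - 1) 0) (hstep ▸ hdrop) | simp_all)
      | false =>
        have hbr : List.elem ch ['<', '(', '{', '[', '>', ')', '}', ']'] = false := by
          simp only [List.elem_eq_mem, decide_eq_false_iff_not, List.mem_cons] at hop hcl ⊢
          tauto
        have hstep : depthStep d ch = d := by
          simp only [depthStep, hop, hcl]
          split_ifs <;> simp_all
        simp only [splitA_go, splitB_search, hop, hbr, hcl, hget, Bool.not_false,
          Bool.and_true, Bool.true_and, Bool.false_eq_true, reduceIte]
        split_ifs <;> first | rfl | exact ih (i + 1) d (hstep ▸ hdrop) | simp_all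

-- ===== VERDICT (by name: the statement is the Claim_ definition above) =====
theorem split_top_level_once_spec : Claim_equal_split_top_level_once := by
  intro text separator _
  unfold Spec_split_top_level_once split_top_level_once split_top_level_once_alt
  rw [splitB_depths_eq]
  exact splitA_eq_splitB _ _ _ _ 0 0 (by simp)
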